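-- pv_equiv track=rewrite | github.com/wyk18703232953/myResearch | codeComplex/data/filteredData/python/quadratic/python_quadratic_0364.py | run_core
-- ===== SOURCE A (Python) =====
-- def list2d(a, b, c):
--     return [[c] * b for _ in range(a)]
--
-- def run_core(H, W, grid):
--     ans = []
--     imosw = list2d(H + 2, W + 2, 0)
--     imosh = list2d(H + 2, W + 2, 0)
--
--     L = list2d(H + 2, W + 2, 0)
--     R = list2d(H + 2, W + 2, 0)
--     U = list2d(H + 2, W + 2, 0)
--     D = list2d(H + 2, W + 2, 0)
--
--     def check(i, j):
--         sz = min(L[i][j], R[i][j], U[i][j], D[i][j])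
--         if sz > 1:
--             imosw[i][j - sz + 1] += 1
--             imosw[i][j + sz] -= 1
--             imosh[i - sz + 1][j] += 1
--             imosh[i + sz][j] -= 1
--             ans.append((i, j, sz - 1))
--
--     def check2():
--         for i in range(1, H + 1):
--             for j in range(1, W + 1):
--                 if grid[i][j] == '*' and not imosw[i][j] and not imosh[i][j]:
--                     return False
--         return True
--
--     for i in range(1, H + 1):
--         for j in range(1, W + 1):
--             if grid[i][j] == '.':
--                 L[i][j] = 0
--
--             else:
--                 L[i][j] = L[i][j - 1] + 1
--
--     for i in range(1, H + 1):
--         for j in range(W, 0, -1):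
--             if grid[i][j] == '.':
--                 R[i][j] = 0
--
--             else:
--                 R[i][j] = R[i][j + 1] + 1
--
--     for j in range(1, W + 1):
--         for i in range(1, H + 1):
--             if grid[i][j] == '.':
--                 U[i][j] = 0
--
--             else:
--                 U[i][j] = U[i - 1][j] + 1
--
--     for j in range(1, W + 1):
--         for i in range(H, 0, -1):
--             if grid[i][j] == '.':
--                 D[i][j] = 0
--
--             else:
--                 D[i][j] = D[i + 1][j] + 1
--
--     for i in range(1, H + 1):
--         for j in range(1, W + 1):
--             if grid[i][j] == '*':
--                 check(i, j)
--
--     for i in range(1, H + 1):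
--         for j in range(W + 1):
--             imosw[i][j + 1] += imosw[i][j]
--
--     for j in range(1, W + 1):
--         for i in range(H + 1):
--             imosh[i + 1][j] += imosh[i][j]
--
--     if check2():
--         output_lines = [str(len(ans))]
--         for h, w, sz in ans:
--             output_lines.append(f"{h} {w} {sz}")
--         return "\n".join(output_lines)
--
--     else:
--         return "-1"
-- ===== SOURCE B (Python) =====
-- def run_core(H, W, grid):
--     # Same four L/R/U/D run-length passes; but coverage is tracked in a single
--     # boolean grid marked directly per placed cross, instead of two imos
--     # difference arrays followed by prefix-sum passes.
--     L = [[0] * (W + 2) for _ in range(H + 2)]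
--     R = [[0] * (W + 2) for _ in range(H + 2)]
--     U = [[0] * (W + 2) for _ in range(H + 2)]
--     D = [[0] * (W + 2) for _ in range(H + 2)]
--
--     for i in range(1, H + 1):
--         for j in range(1, W + 1):
--             if grid[i][j] == '.':
--                 L[i][j] = 0
--             else:
--                 L[i][j] = L[i][j - 1] + 1
--
--     for i in range(1, H + 1):
--         for j in range(W, 0, -1):
--             if grid[i][j] == '.':
--                 R[i][j] = 0
--             else:
--                 R[i][j] = R[i][j + 1] + 1
--
--     for j in range(1, W + 1):
--         for i in range(1, H + 1):
--             if grid[i][j] == '.':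
--                 U[i][j] = 0
--             else:
--                 U[i][j] = U[i - 1][j] + 1
--
--     for j in range(1, W + 1):
--         for i in range(H, 0, -1):
--             if grid[i][j] == '.':
--                 D[i][j] = 0
--             else:
--                 D[i][j] = D[i + 1][j] + 1
--
--     ans = []
--     cover = [[False] * (W + 2) for _ in range(H + 2)]
--     for i in range(1, H + 1):
--         for j in range(1, W + 1):
--             if grid[i][j] == '*':
--                 sz = min(L[i][j], R[i][j], U[i][j], D[i][j])
--                 if sz > 1:
--                     s = sz - 1
--                     ans.append((i, j, s))
--                     for c in range(j - s, j + s + 1):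
--                         cover[i][c] = True
--                     for r in range(i - s, i + s + 1):
--                         cover[r][j] = True
--
--     for i in range(1, H + 1):
--         for j in range(1, W + 1):
--             if grid[i][j] == '*' and not cover[i][j]:
--                 return "-1"
--
--     return "\n".join([str(len(ans))] + ["%d %d %d" % t for t in ans])
-- ===== Notes on version B (the rewrite author's own statement) =====
-- stated objective: alternative
-- what changed: B keeps the four L/R/U/D run-length passes and the cross-placement scan, but replaces the two imos difference arrays and their two prefix-sum passes by a single boolean coverage grid whose horizontal and vertical arm cells are marked directly when a cross is placed; the final verification reads that grid instead of prefix sums.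
import Mathlib
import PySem

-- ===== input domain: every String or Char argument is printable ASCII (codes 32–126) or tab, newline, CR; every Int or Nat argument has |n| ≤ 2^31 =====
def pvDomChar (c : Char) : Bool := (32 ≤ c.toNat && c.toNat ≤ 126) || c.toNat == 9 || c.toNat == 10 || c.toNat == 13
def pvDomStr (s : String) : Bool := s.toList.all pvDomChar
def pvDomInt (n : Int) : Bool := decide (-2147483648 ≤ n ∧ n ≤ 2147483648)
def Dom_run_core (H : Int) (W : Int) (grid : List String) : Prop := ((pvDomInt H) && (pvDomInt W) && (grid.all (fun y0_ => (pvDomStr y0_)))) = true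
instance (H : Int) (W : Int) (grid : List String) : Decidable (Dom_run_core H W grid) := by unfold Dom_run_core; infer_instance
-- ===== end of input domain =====

-- B replaces the two imos difference arrays + prefix-sum passes by one boolean
-- coverage grid marked directly per placed cross (objective: alternative; return
-- value only — neither program mutates its arguments observably).

-- ===== PORT A =====
-- shared by both ports (the corresponding Python lines are identical in Source A and Source B):
-- grid[i][j] as a total lookup; ' ' default is never reached under Pre_.
def pvGrid (grid : List String) (i j : Int) : Char :=
  ((PySem.List.pyGet? grid i).bind (fun s => PySem.Str.pyGet? s j)).getD ' '

-- a Python 2D list of ints (initially all 0), as a write log: a write conses,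
-- a read takes the most recent write (0 if none)
def pvSet (w : List ((Int × Int) × Int)) (i j v : Int) : List ((Int × Int) × Int) :=
  ((i, j), v) :: w

def pvGet (w : List ((Int × Int) × Int)) (i j : Int) : Int :=
  match w with
  | [] => 0
  | ((p, q), v) :: r => if i = p ∧ j = q then v else pvGet r i j

def pvRange (a b : Int) : List Int := PySem.List.pyRange a b 1

-- the four run-length passes (identical code in Source A and Source B)
def pvRuns (H W : Int) (g : Int → Int → Char) :
    List ((Int × Int) × Int) × List ((Int × Int) × Int) × List ((Int × Int) × Int) × List ((Int × Int) × Int) :=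
  let L := (pvRange 1 (H+1)).foldl (fun L i => (pvRange 1 (W+1)).foldl (fun L j =>
    if g i j = '.' then pvSet L i j 0 else pvSet L i j (pvGet L i (j-1) + 1)) L) []
  let R := (pvRange 1 (H+1)).foldl (fun R i => (PySem.List.pyRange W 0 (-1)).foldl (fun R j =>
    if g i j = '.' then pvSet R i j 0 else pvSet R i j (pvGet R i (j+1) + 1)) R) []
  let U := (pvRange 1 (W+1)).foldl (fun U j => (pvRange 1 (H+1)).foldl (fun U i =>
    if g i j = '.' then pvSet U i j 0 else pvSet U i j (pvGet U (i-1) j + 1)) U) []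
  let D := (pvRange 1 (W+1)).foldl (fun D j => (PySem.List.pyRange H 0 (-1)).foldl (fun D i =>
    if g i j = '.' then pvSet D i j 0 else pvSet D i j (pvGet D (i+1) j + 1)) D) []
  (L, R, U, D)

-- output formatting (identical in both Pythons up to f-string vs %-format)
def pvOutput (ans : List (Int × Int × Int)) : String :=
  PySem.Str.join "\n" (PySem.Int.toStr ans.length ::
    ans.map (fun t => PySem.Str.join " " [PySem.Int.toStr t.1, PySem.Int.toStr t.2.1, PySem.Int.toStr t.2.2]))

-- A's `check(i, j)` acting on the state (imosw, imosh, ans)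
def pvCheck (L R U D : List ((Int × Int) × Int)) (i j : Int)
    (st : List ((Int × Int) × Int) × List ((Int × Int) × Int) × List (Int × Int × Int)) :
    List ((Int × Int) × Int) × List ((Int × Int) × Int) × List (Int × Int × Int) :=
  let sz := min (min (min (pvGet L i j) (pvGet R i j)) (pvGet U i j)) (pvGet D i j)
  if sz > 1 then
    let w1 := pvSet st.1 i (j - sz + 1) (pvGet st.1 i (j - sz + 1) + 1)
    let w2 := pvSet w1 i (j + sz) (pvGet w1 i (j + sz) - 1)
    let h1 := pvSet st.2.1 (i - sz + 1) j (pvGet st.2.1 (i - sz + 1) j + 1)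
    let h2 := pvSet h1 (i + sz) j (pvGet h1 (i + sz) j - 1)
    (w2, h2, st.2.2 ++ [(i, j, sz - 1)])
  else st

def pvScanA (H W : Int) (g : Int → Int → Char) (L R U D : List ((Int × Int) × Int)) :
    List ((Int × Int) × Int) × List ((Int × Int) × Int) × List (Int × Int × Int) :=
  (pvRange 1 (H+1)).foldl (fun st i => (pvRange 1 (W+1)).foldl (fun st j =>
    if g i j = '*' then pvCheck L R U D i j st else st) st)
    ([], [], [])

-- the two imos prefix-sum passes
def pvPrefW (H W : Int) (w : List ((Int × Int) × Int)) : List ((Int × Int) × Int) :=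
  (pvRange 1 (H+1)).foldl (fun w i => (pvRange 0 (W+1)).foldl (fun w j =>
    pvSet w i (j+1) (pvGet w i (j+1) + pvGet w i j)) w) w

def pvPrefH (H W : Int) (h : List ((Int × Int) × Int)) : List ((Int × Int) × Int) :=
  (pvRange 1 (W+1)).foldl (fun h j => (pvRange 0 (H+1)).foldl (fun h i =>
    pvSet h (i+1) j (pvGet h (i+1) j + pvGet h i j)) h) h

def run_core (H : Int) (W : Int) (grid : List String) : String :=
  let g := pvGrid grid
  let r := pvRuns H W g
  let st := pvScanA H W g r.1 r.2.1 r.2.2.1 r.2.2.2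
  let imosw := pvPrefW H W st.1
  let imosh := pvPrefH H W st.2.1
  -- check2: the early-return double loop, as an `all`
  let ok := (pvRange 1 (H+1)).all (fun i => (pvRange 1 (W+1)).all (fun j =>
    !(decide (g i j = '*') && decide (pvGet imosw i j = 0) && decide (pvGet imosh i j = 0))))
  if ok then pvOutput st.2.2 else "-1"

-- ===== PORT B =====
-- B's boolean coverage grid (initially all False), same write-log representation
def pvGetB (cov : List (Int × Int)) (i j : Int) : Bool :=
  match cov with
  | [] => false
  | (p, q) :: r => if i = p ∧ j = q then true else pvGetB r i j

-- mark the horizontal then the vertical arm of the cross at (i, j) of radius s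
def pvMark (i j s : Int) (cov : List (Int × Int)) : List (Int × Int) :=
  let cov := (pvRange (j - s) (j + s + 1)).foldl (fun cov c => (i, c) :: cov) cov
  (pvRange (i - s) (i + s + 1)).foldl (fun cov r => (r, j) :: cov) cov

def pvScanB (H W : Int) (g : Int → Int → Char) (L R U D : List ((Int × Int) × Int)) :
    List (Int × Int × Int) × List (Int × Int) :=
  (pvRange 1 (H+1)).foldl (fun st i => (pvRange 1 (W+1)).foldl (fun st j =>
    if g i j = '*' then
      let sz := min (min (min (pvGet L i j) (pvGet R i j)) (pvGet U i j)) (pvGet D i j)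
      if sz > 1 then (st.1 ++ [(i, j, sz - 1)], pvMark i j (sz - 1) st.2) else st
    else st) st) ([], [])

def run_core_alt (H : Int) (W : Int) (grid : List String) : String :=
  let g := pvGrid grid
  let r := pvRuns H W g
  let st := pvScanB H W g r.1 r.2.1 r.2.2.1 r.2.2.2
  let ok := (pvRange 1 (H+1)).all (fun i => (pvRange 1 (W+1)).all (fun j =>
    !(decide (g i j = '*') && !(pvGetB st.2 i j))))
  if ok then pvOutput st.1 else "-1"

-- ===== PRECONDITION & SPEC =====
-- Pre_ excludes exactly the inputs where A raises an IndexError: when the scan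
-- region is nonempty (H ≥ 1 and W ≥ 1), grid must have more than H rows and the
-- accessed rows 1..H must each have more than W characters.
def Pre_run_core (H : Int) (W : Int) (grid : List String) : Prop :=
  1 ≤ H → 1 ≤ W →
    (H + 1 ≤ (grid.length : Int) ∧
     ∀ s ∈ (grid.drop 1).take H.toNat, W + 1 ≤ (s.toList.length : Int))
instance (H : Int) (W : Int) (grid : List String) : Decidable (Pre_run_core H W grid) := by
  unfold Pre_run_core; infer_instance

def pvWitness_run_core : Int × Int × List String := (1, 1, ["..", ".."])

def Spec_run_core (H : Int) (W : Int) (grid : List String) (out : String) : Prop := out = run_core_alt H W grid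
instance (H : Int) (W : Int) (grid : List String) (out : String) : Decidable (Spec_run_core H W grid out) := by unfold Spec_run_core; infer_instance

-- ===== CLAIM (what is proved, stated in full; the proofs are below) =====
def Claim_equal_run_core : Prop := ∀ (H : Int) (W : Int) (grid : List String), Dom_run_core H W grid → Pre_run_core H W grid → Spec_run_core H W grid (run_core H W grid)

-- ===== LEMMAS AND PROOFS =====

-- generic fold helpers ------------------------------------------------------

theorem pv_foldl_id {α γ : Type} (l : List γ) (a : α) : l.foldl (fun a _ => a) a = a := by
  induction l generalizing a with
  | nil => rfl
  | cons c l ih => exact ih a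

theorem pv_foldl_inv {α γ : Type} (l : List γ) (f : α → γ → α) (P : α → Prop)
    (h : ∀ a c, c ∈ l → P a → P (f a c)) : ∀ a, P a → P (l.foldl f a) := by
  induction l with
  | nil => intro a ha; exact ha
  | cons c l ih =>
    intro a ha
    exact ih (fun a e he => h a e (List.mem_cons_of_mem _ he)) _ (h a c (List.mem_cons_self) ha)

theorem pv_foldl_rel {α β γ : Type} (l : List γ) (f : α → γ → α) (g : β → γ → β)
    (R : α → β → Prop) (h : ∀ a b c, c ∈ l → R a b → R (f a c) (g b c)) :
    ∀ a b, R a b → R (l.foldl f a) (l.foldl g b) := by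
  induction l with
  | nil => intro a b hab; exact hab
  | cons c l ih =>
    intro a b hab
    exact ih (fun a b e he => h a b e (List.mem_cons_of_mem _ he)) _ _ (h a b c (List.mem_cons_self) hab)

theorem pvGet_set (w : List ((Int × Int) × Int)) (i j v x c : Int) :
    pvGet (pvSet w i j v) x c = if x = i ∧ c = j then v else pvGet w x c := by
  simp [pvSet, pvGet]

-- the mathematical descriptions of A's difference arrays and B's coverage ----

def pvDW (t : Int × Int × Int) (x c : Int) : Int :=
  (if x = t.1 ∧ c = t.2.1 - t.2.2 then 1 else 0) - (if x = t.1 ∧ c = t.2.1 + t.2.2 + 1 then 1 else 0)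

def pvDH (t : Int × Int × Int) (x c : Int) : Int :=
  (if c = t.2.1 ∧ x = t.1 - t.2.2 then 1 else 0) - (if c = t.2.1 ∧ x = t.1 + t.2.2 + 1 then 1 else 0)

def pvDiffW (ans : List (Int × Int × Int)) (x c : Int) : Int := (ans.map (fun t => pvDW t x c)).sum
def pvDiffH (ans : List (Int × Int × Int)) (x c : Int) : Int := (ans.map (fun t => pvDH t x c)).sum

abbrev pvHCov (t : Int × Int × Int) (x c : Int) : Prop :=
  x = t.1 ∧ t.2.1 - t.2.2 ≤ c ∧ c ≤ t.2.1 + t.2.2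
abbrev pvVCov (t : Int × Int × Int) (x c : Int) : Prop :=
  c = t.2.1 ∧ t.1 - t.2.2 ≤ x ∧ x ≤ t.1 + t.2.2

def pvInv (stA : List ((Int × Int) × Int) × List ((Int × Int) × Int) × List (Int × Int × Int))
    (stB : List (Int × Int × Int) × List (Int × Int)) : Prop :=
  stB.1 = stA.2.2 ∧
  (∀ x c, pvGet stA.1 x c = pvDiffW stA.2.2 x c) ∧
  (∀ x c, pvGet stA.2.1 x c = pvDiffH stA.2.2 x c) ∧
  (∀ x c, pvGetB stB.2 x c = true ↔ ∃ t ∈ stA.2.2, pvHCov t x c ∨ pvVCov t x c) ∧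
  (∀ t ∈ stA.2.2, 1 ≤ t.2.2 ∧ 1 ≤ t.2.1 - t.2.2 ∧ 1 ≤ t.1 - t.2.2)

-- bounds on the run-length arrays ------------------------------------------

theorem pv_runs_pass_bound (rows cols : List Int) (g : Int → Int → Char)
    (hcols : ∀ j, j ∈ cols → 1 ≤ j) (w0 : List ((Int × Int) × Int))
    (h0 : ∀ x c, pvGet w0 x c ≤ max c 0) :
    ∀ x c, pvGet (rows.foldl (fun L i => cols.foldl (fun L j =>
      if g i j = '.' then pvSet L i j 0 else pvSet L i j (pvGet L i (j-1) + 1)) L) w0) x c ≤ max c 0 := by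
  refine pv_foldl_inv rows
    (fun L i => cols.foldl (fun L j => if g i j = '.' then pvSet L i j 0 else pvSet L i j (pvGet L i (j-1) + 1)) L)
    (fun w => ∀ x c, pvGet w x c ≤ max c 0) ?_ w0 h0
  intro w i _ hw
  refine pv_foldl_inv cols
    (fun L j => if g i j = '.' then pvSet L i j 0 else pvSet L i j (pvGet L i (j-1) + 1))
    (fun w => ∀ x c, pvGet w x c ≤ max c 0) ?_ w hw
  intro w j hj hw' x c
  have hj1 := hcols j hj
  have hp := hw' i (j - 1)
  have hg := hw' x c
  by_cases hd : g i j = '.' <;> (simp [hd, pvSet, pvGet]; (try split_ifs) <;> omega)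

theorem pvRuns_L_bound (H W : Int) (g : Int → Int → Char) :
    ∀ i j, pvGet (pvRuns H W g).1 i j ≤ max j 0 := by
  intro i j
  show pvGet ((pvRange 1 (H+1)).foldl _ []) i j ≤ max j 0
  refine pv_runs_pass_bound _ _ g ?_ [] ?_ i j
  · intro j hj; exact (PySem.List.mem_pyRange_one.mp hj).1
  · intro x c; simp [pvGet]

theorem pv_runs_pass_bound_v (rows cols : List Int) (g : Int → Int → Char)
    (hcols : ∀ i, i ∈ cols → 1 ≤ i) (w0 : List ((Int × Int) × Int))
    (h0 : ∀ x c, pvGet w0 x c ≤ max x 0) :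
    ∀ x c, pvGet (rows.foldl (fun U j => cols.foldl (fun U i =>
      if g i j = '.' then pvSet U i j 0 else pvSet U i j (pvGet U (i-1) j + 1)) U) w0) x c ≤ max x 0 := by
  refine pv_foldl_inv rows
    (fun U j => cols.foldl (fun U i => if g i j = '.' then pvSet U i j 0 else pvSet U i j (pvGet U (i-1) j + 1)) U)
    (fun w => ∀ x c, pvGet w x c ≤ max x 0) ?_ w0 h0
  intro w j _ hw
  refine pv_foldl_inv cols
    (fun U i => if g i j = '.' then pvSet U i j 0 else pvSet U i j (pvGet U (i-1) j + 1))
    (fun w => ∀ x c, pvGet w x c ≤ max x 0) ?_ w hw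
  intro w i hi hw' x c
  have hi1 := hcols i hi
  have hp := hw' (i - 1) j
  have hg := hw' x c
  by_cases hd : g i j = '.' <;> (simp [hd, pvSet, pvGet]; (try split_ifs) <;> omega)

theorem pvRuns_U_bound (H W : Int) (g : Int → Int → Char) :
    ∀ i j, pvGet (pvRuns H W g).2.2.1 i j ≤ max i 0 := by
  intro i j
  show pvGet ((pvRange 1 (W+1)).foldl _ []) i j ≤ max i 0
  refine pv_runs_pass_bound_v _ _ g ?_ [] ?_ i j
  · intro i hi; exact (PySem.List.mem_pyRange_one.mp hi).1
  · intro x c; simp [pvGet]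

-- the marking fold of B ------------------------------------------------------

theorem pvGetB_fold_cons (l : List Int) (k : Int → Int × Int) (cov : List (Int × Int)) (x c : Int) :
    pvGetB (l.foldl (fun cov e => k e :: cov) cov) x c = true ↔
      (∃ e ∈ l, (x, c) = k e) ∨ pvGetB cov x c = true := by
  induction l generalizing cov with
  | nil => simp
  | cons a l ih =>
    rw [List.foldl_cons, ih]
    rcases hk : k a with ⟨p, q⟩
    have : pvGetB ((p, q) :: cov) x c = true ↔ (x = p ∧ c = q) ∨ pvGetB cov x c = true := by
      simp only [pvGetB]
      split_ifs with h
      · simp [h]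
      · simp [h]
    rw [this]
    constructor
    · rintro (⟨e, he, hxe⟩ | (⟨rfl, rfl⟩ | hc))
      · exact Or.inl ⟨e, List.mem_cons_of_mem _ he, hxe⟩
      · exact Or.inl ⟨a, List.mem_cons_self, by rw [hk]⟩
      · exact Or.inr hc
    · rintro (⟨e, he, hxe⟩ | hc)
      · rcases List.mem_cons.mp he with rfl | he
        · rw [hk] at hxe
          injection hxe with h1 h2
          exact Or.inr (Or.inl ⟨h1, h2⟩)
        · exact Or.inl ⟨e, he, hxe⟩
      · exact Or.inr (Or.inr hc)

theorem pvGetB_mark (i j s : Int) (cov : List (Int × Int)) (x c : Int) :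
    pvGetB (pvMark i j s cov) x c = true ↔
      (pvHCov (i, j, s) x c ∨ pvVCov (i, j, s) x c) ∨ pvGetB cov x c = true := by
  unfold pvMark
  rw [pvGetB_fold_cons (k := fun r => (r, j)), pvGetB_fold_cons (k := fun e => (i, e))]
  have hh : (∃ e ∈ pvRange (j - s) (j + s + 1), (x, c) = (i, e)) ↔ pvHCov (i, j, s) x c := by
    constructor
    · rintro ⟨e, he, hpair⟩
      have hb := PySem.List.mem_pyRange_one.mp (show e ∈ PySem.List.pyRange (j - s) (j + s + 1) 1 from he)
      injection hpair with hx hc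
      exact ⟨hx, show j - s ≤ c by omega, show c ≤ j + s by omega⟩
    · rintro ⟨rfl, h1, h2⟩
      have h1' : j - s ≤ c := h1
      have h2' : c ≤ j + s := h2
      exact ⟨c, by unfold pvRange; exact PySem.List.mem_pyRange_one.mpr ⟨h1', by omega⟩, rfl⟩
  have hv : (∃ e ∈ pvRange (i - s) (i + s + 1), (x, c) = (e, j)) ↔ pvVCov (i, j, s) x c := by
    constructor
    · rintro ⟨e, he, hpair⟩
      have hb := PySem.List.mem_pyRange_one.mp (show e ∈ PySem.List.pyRange (i - s) (i + s + 1) 1 from he)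
      injection hpair with hx hc
      exact ⟨hc, show i - s ≤ x by omega, show x ≤ i + s by omega⟩
    · rintro ⟨rfl, h1, h2⟩
      have h1' : i - s ≤ x := h1
      have h2' : x ≤ i + s := h2
      exact ⟨x, by unfold pvRange; exact PySem.List.mem_pyRange_one.mpr ⟨h1', by omega⟩, rfl⟩
  rw [hh, hv]; tauto

-- the simultaneous scan invariant -------------------------------------------

theorem pvGet_incdec (w : List ((Int × Int) × Int)) (i p q x c : Int) (hpq : p ≠ q) :
    pvGet (pvSet (pvSet w i p (pvGet w i p + 1)) i q (pvGet (pvSet w i p (pvGet w i p + 1)) i q - 1)) x c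
      = pvGet w x c + ((if x = i ∧ c = p then (1:Int) else 0) - (if x = i ∧ c = q then 1 else 0)) := by
  by_cases h1 : x = i ∧ c = q
  · obtain ⟨rfl, rfl⟩ := h1
    simp only [pvGet_set]
    split_ifs <;> omega
  · by_cases h2 : x = i ∧ c = p
    · obtain ⟨rfl, rfl⟩ := h2
      simp only [pvGet_set]
      split_ifs <;> omega
    · simp only [pvGet_set]
      split_ifs
      omega

theorem pvGet_incdec_v (w : List ((Int × Int) × Int)) (j p q x c : Int) (hpq : p ≠ q) :
    pvGet (pvSet (pvSet w p j (pvGet w p j + 1)) q j (pvGet (pvSet w p j (pvGet w p j + 1)) q j - 1)) x c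
      = pvGet w x c + ((if x = p ∧ c = j then (1:Int) else 0) - (if x = q ∧ c = j then 1 else 0)) := by
  by_cases h1 : x = q ∧ c = j
  · obtain ⟨rfl, rfl⟩ := h1
    simp only [pvGet_set]
    split_ifs <;> omega
  · by_cases h2 : x = p ∧ c = j
    · obtain ⟨rfl, rfl⟩ := h2
      simp only [pvGet_set]
      split_ifs <;> omega
    · simp only [pvGet_set]
      split_ifs
      omega

theorem pvDiffW_append_single (l : List (Int × Int × Int)) (t : Int × Int × Int) (x c : Int) :
    pvDiffW (l ++ [t]) x c = pvDiffW l x c + pvDW t x c := by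
  simp [pvDiffW]

theorem pvDiffH_append_single (l : List (Int × Int × Int)) (t : Int × Int × Int) (x c : Int) :
    pvDiffH (l ++ [t]) x c = pvDiffH l x c + pvDH t x c := by
  simp [pvDiffH]

theorem pv_scan_step (g : Int → Int → Char) (L R U D : List ((Int × Int) × Int))
    (hL : ∀ i j, pvGet L i j ≤ max j 0) (hU : ∀ i j, pvGet U i j ≤ max i 0)
    (i j : Int) (hi1 : 1 ≤ i) (hj1 : 1 ≤ j)
    (stA : List ((Int × Int) × Int) × List ((Int × Int) × Int) × List (Int × Int × Int))
    (stB : List (Int × Int × Int) × List (Int × Int)) (hR : pvInv stA stB) :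
    pvInv (if g i j = '*' then pvCheck L R U D i j stA else stA)
      (if g i j = '*' then
        (let sz := min (min (min (pvGet L i j) (pvGet R i j)) (pvGet U i j)) (pvGet D i j);
         if sz > 1 then (stB.1 ++ [(i, j, sz - 1)], pvMark i j (sz - 1) stB.2) else stB)
       else stB) := by
  by_cases hstar : g i j = '*'
  case neg => rw [if_neg hstar, if_neg hstar]; exact hR
  rw [if_pos hstar, if_pos hstar]
  unfold pvCheck
  simp only []
  by_cases hsz : min (min (min (pvGet L i j) (pvGet R i j)) (pvGet U i j)) (pvGet D i j) > 1
  case neg => rw [if_neg hsz, if_neg hsz]; exact hR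
  rw [if_pos hsz, if_pos hsz]
  obtain ⟨hBA, hw, hh, hcov, hbnd⟩ := hR
  have hmL : min (min (min (pvGet L i j) (pvGet R i j)) (pvGet U i j)) (pvGet D i j) ≤ pvGet L i j :=
    le_trans (min_le_left _ _) (le_trans (min_le_left _ _) (min_le_left _ _))
  have hmU : min (min (min (pvGet L i j) (pvGet R i j)) (pvGet U i j)) (pvGet D i j) ≤ pvGet U i j :=
    le_trans (min_le_left _ _) (min_le_right _ _)
  have hLj : pvGet L i j ≤ j := by have := hL i j; omega
  have hUi : pvGet U i j ≤ i := by have := hU i j; omega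
  set m := min (min (min (pvGet L i j) (pvGet R i j)) (pvGet U i j)) (pvGet D i j) with hm
  refine ⟨?_, ?_, ?_, ?_, ?_⟩
  · show stB.1 ++ [(i, j, m - 1)] = stA.2.2 ++ [(i, j, m - 1)]
    rw [hBA]
  · intro x c
    show pvGet (pvSet (pvSet stA.1 i (j - m + 1) (pvGet stA.1 i (j - m + 1) + 1)) i (j + m)
        (pvGet (pvSet stA.1 i (j - m + 1) (pvGet stA.1 i (j - m + 1) + 1)) i (j + m) - 1)) x c
      = pvDiffW (stA.2.2 ++ [(i, j, m - 1)]) x c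
    rw [pvGet_incdec _ _ _ _ _ _ (by omega), hw x c, pvDiffW_append_single]
    have : pvDW (i, j, m - 1) x c
        = ((if x = i ∧ c = j - m + 1 then (1:Int) else 0) - (if x = i ∧ c = j + m then 1 else 0)) := by
      show ((if x = i ∧ c = j - (m - 1) then (1:Int) else 0) - (if x = i ∧ c = j + (m - 1) + 1 then 1 else 0)) = _
      split_ifs <;> omega
    rw [this]
  · intro x c
    show pvGet (pvSet (pvSet stA.2.1 (i - m + 1) j (pvGet stA.2.1 (i - m + 1) j + 1)) (i + m) j
        (pvGet (pvSet stA.2.1 (i - m + 1) j (pvGet stA.2.1 (i - m + 1) j + 1)) (i + m) j - 1)) x c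
      = pvDiffH (stA.2.2 ++ [(i, j, m - 1)]) x c
    rw [pvGet_incdec_v _ _ _ _ _ _ (by omega), hh x c, pvDiffH_append_single]
    have : pvDH (i, j, m - 1) x c
        = ((if x = i - m + 1 ∧ c = j then (1:Int) else 0) - (if x = i + m ∧ c = j then 1 else 0)) := by
      show ((if c = j ∧ x = i - (m - 1) then (1:Int) else 0) - (if c = j ∧ x = i + (m - 1) + 1 then 1 else 0)) = _
      split_ifs <;> omega
    rw [this]
  · intro x c
    show pvGetB (pvMark i j (m - 1) stB.2) x c = true ↔
      ∃ t ∈ stA.2.2 ++ [(i, j, m - 1)], pvHCov t x c ∨ pvVCov t x c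
    rw [pvGetB_mark]
    constructor
    · rintro (hnew | hold)
      · exact ⟨(i, j, m - 1), List.mem_append_right _ (List.mem_singleton.mpr rfl), hnew⟩
      · obtain ⟨t, ht, hc⟩ := (hcov x c).mp hold
        exact ⟨t, List.mem_append_left _ ht, hc⟩
    · rintro ⟨t, ht, hc⟩
      rcases List.mem_append.mp ht with ht | ht
      · exact Or.inr ((hcov x c).mpr ⟨t, ht, hc⟩)
      · rw [List.mem_singleton] at ht
        subst ht
        exact Or.inl hc
  · intro t ht
    rcases List.mem_append.mp (show t ∈ stA.2.2 ++ [(i, j, m - 1)] from ht) with ht | ht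
    · exact hbnd t ht
    · rw [List.mem_singleton] at ht
      subst ht
      exact ⟨show (1:Int) ≤ m - 1 by omega, show (1:Int) ≤ j - (m - 1) by omega,
        show (1:Int) ≤ i - (m - 1) by omega⟩

theorem pv_scan (H W : Int) (g : Int → Int → Char) (L R U D : List ((Int × Int) × Int))
    (hL : ∀ i j, pvGet L i j ≤ max j 0) (hU : ∀ i j, pvGet U i j ≤ max i 0) :
    pvInv (pvScanA H W g L R U D) (pvScanB H W g L R U D) := by
  unfold pvScanA pvScanB
  refine pv_foldl_rel _ _ _ pvInv ?_ _ _ ?_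
  · intro a b i hi hR
    refine pv_foldl_rel _ _ _ pvInv ?_ _ _ hR
    intro a b j hj hR'
    have hi1 : 1 ≤ i := (PySem.List.mem_pyRange_one.mp (show i ∈ PySem.List.pyRange 1 (H+1) 1 from hi)).1
    have hj1 : 1 ≤ j := (PySem.List.mem_pyRange_one.mp (show j ∈ PySem.List.pyRange 1 (W+1) 1 from hj)).1
    exact pv_scan_step g L R U D hL hU i j hi1 hj1 a b hR'
  · refine ⟨rfl, ?_, ?_, ?_, ?_⟩
    · intro x c; simp [pvGet, pvDiffW]
    · intro x c; simp [pvGet, pvDiffH]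
    · intro x c; simp [pvGetB]
    · intro t ht; exact absurd ht List.not_mem_nil

-- prefix sums ----------------------------------------------------------------

def pvSumTo (f : Int → Int) : Nat → Int
  | 0 => f 0
  | Nat.succ n => pvSumTo f n + f ((n : Int) + 1)

theorem pvSumTo_congr (f g : Int → Int) (h : ∀ k, f k = g k) : ∀ n, pvSumTo f n = pvSumTo g n := by
  intro n; induction n with
  | zero => simp [pvSumTo, h]
  | succ n ih => simp [pvSumTo, h, ih]

theorem pvSumTo_zero_fn (n : Nat) : pvSumTo (fun _ => (0:Int)) n = 0 := by
  induction n with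
  | zero => rfl
  | succ n ih => simp [pvSumTo, ih]

theorem pvSumTo_sub (f g : Int → Int) (n : Nat) :
    pvSumTo (fun k => f k - g k) n = pvSumTo f n - pvSumTo g n := by
  induction n with
  | zero => rfl
  | succ n ih => simp [pvSumTo, ih]; ring

theorem pvSumTo_add (f g : Int → Int) (n : Nat) :
    pvSumTo (fun k => f k + g k) n = pvSumTo f n + pvSumTo g n := by
  induction n with
  | zero => rfl
  | succ n ih => simp [pvSumTo, ih]; ring

theorem pvSumTo_spike (p A : Int) (n : Nat) :
    pvSumTo (fun k => if k = p then A else 0) n = if 0 ≤ p ∧ p ≤ (n : Int) then A else 0 := by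
  induction n with
  | zero => simp only [pvSumTo]; split_ifs <;> omega
  | succ n ih =>
    simp only [pvSumTo, ih]
    push_cast
    split_ifs <;> omega

-- the horizontal prefix pass computes row prefix sums
theorem pv_prefW_inner (n : Nat) (w : List ((Int × Int) × Int)) (r : Int) :
    ∀ x c, pvGet ((pvRange 0 (n : Int)).foldl (fun w j => pvSet w r (j+1) (pvGet w r (j+1) + pvGet w r j)) w) x c
      = if x = r ∧ 1 ≤ c ∧ c ≤ (n : Int) then pvSumTo (fun k => pvGet w r k) c.toNat else pvGet w x c := by
  induction n with
  | zero =>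
    intro x c
    rw [show pvRange 0 ((0:Nat):Int) = [] from PySem.List.pyRange_one_eq_nil (by norm_num)]
    simp only [List.foldl_nil]
    rw [if_neg (by omega)]
  | succ n ih =>
    intro x c
    have hsplit : pvRange 0 ((n+1 : Nat) : Int) = pvRange 0 (n : Int) ++ [(n : Int)] := by
      unfold pvRange
      push_cast
      exact PySem.List.pyRange_one_succ_right (by positivity)
    rw [hsplit, List.foldl_append, List.foldl_cons, List.foldl_nil]
    have hmid : pvGet ((pvRange 0 (n : Int)).foldl (fun w j => pvSet w r (j+1) (pvGet w r (j+1) + pvGet w r j)) w) r (n : Int)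
        = pvSumTo (fun k => pvGet w r k) n := by
      rcases Nat.eq_zero_or_pos n with rfl | hn
      · rw [ih r ((0:Nat) : Int), if_neg (by omega)]
        simp [pvSumTo]
      · rw [ih r (n : Int), if_pos ⟨rfl, by exact_mod_cast hn, le_refl _⟩]
        simp
    have htop : pvGet ((pvRange 0 (n : Int)).foldl (fun w j => pvSet w r (j+1) (pvGet w r (j+1) + pvGet w r j)) w) r ((n : Int)+1)
        = pvGet w r ((n : Int) + 1) := by
      rw [ih r ((n : Int)+1), if_neg (by omega)]
    rw [pvGet_set]
    by_cases hxc : x = r ∧ c = (n : Int) + 1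
    · rw [if_pos hxc, hmid, htop]
      have hct : c.toNat = n + 1 := by omega
      rw [if_pos ⟨hxc.1, by omega, by omega⟩, hct]
      simp only [pvSumTo]
      omega
    · rw [if_neg hxc, ih x c]
      by_cases hcond : x = r ∧ 1 ≤ c ∧ c ≤ (n : Int)
      · rw [if_pos hcond, if_pos ⟨hcond.1, hcond.2.1, by omega⟩]
      · rw [if_neg hcond, if_neg (by push_cast; omega)]

theorem pv_prefW_outer (rs : List Int) (hnd : rs.Nodup) (n : Nat) :
    ∀ (w : List ((Int × Int) × Int)) (x c : Int),
      pvGet ((rs.foldl (fun w i => (pvRange 0 (n : Int)).foldl (fun w j => pvSet w i (j+1) (pvGet w i (j+1) + pvGet w i j)) w) w)) x c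
      = if x ∈ rs ∧ 1 ≤ c ∧ c ≤ (n : Int) then pvSumTo (fun k => pvGet w x k) c.toNat else pvGet w x c := by
  revert hnd
  induction rs with
  | nil => intro _ w x c; simp
  | cons r rs ih =>
    intro hnd w x c
    obtain ⟨hr, hnd'⟩ := List.nodup_cons.mp hnd
    rw [List.foldl_cons, ih hnd' _ x c]
    have hinner := pv_prefW_inner n w r
    by_cases hxr : x = r
    · subst hxr
      rw [if_neg (fun h => hr h.1), hinner x c]
      by_cases hc : 1 ≤ c ∧ c ≤ (n : Int)
      · rw [if_pos ⟨rfl, hc.1, hc.2⟩, if_pos ⟨List.mem_cons_self, hc.1, hc.2⟩]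
      · rw [if_neg (by tauto), if_neg (by tauto)]
    · have hw1x : ∀ k, pvGet ((pvRange 0 (n : Int)).foldl (fun w j => pvSet w r (j+1) (pvGet w r (j+1) + pvGet w r j)) w) x k = pvGet w x k :=
        fun k => by rw [hinner x k, if_neg (by tauto)]
      by_cases hmem : x ∈ rs ∧ 1 ≤ c ∧ c ≤ (n : Int)
      · rw [if_pos hmem, if_pos ⟨List.mem_cons_of_mem _ hmem.1, hmem.2⟩]
        exact pvSumTo_congr _ _ (fun k => hw1x k) _
      · rw [if_neg hmem, hw1x c,
          if_neg (by intro h; rcases List.mem_cons.mp h.1 with rfl | hm; exact hxr rfl; exact hmem ⟨hm, h.2⟩)]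

-- the vertical prefix pass, same statements with the coordinates swapped
theorem pv_prefH_inner (n : Nat) (h : List ((Int × Int) × Int)) (r : Int) :
    ∀ x c, pvGet ((pvRange 0 (n : Int)).foldl (fun h i => pvSet h (i+1) r (pvGet h (i+1) r + pvGet h i r)) h) x c
      = if c = r ∧ 1 ≤ x ∧ x ≤ (n : Int) then pvSumTo (fun k => pvGet h k r) x.toNat else pvGet h x c := by
  induction n with
  | zero =>
    intro x c
    rw [show pvRange 0 ((0:Nat):Int) = [] from PySem.List.pyRange_one_eq_nil (by norm_num)]
    simp only [List.foldl_nil]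
    rw [if_neg (by omega)]
  | succ n ih =>
    intro x c
    have hsplit : pvRange 0 ((n+1 : Nat) : Int) = pvRange 0 (n : Int) ++ [(n : Int)] := by
      unfold pvRange
      push_cast
      exact PySem.List.pyRange_one_succ_right (by positivity)
    rw [hsplit, List.foldl_append, List.foldl_cons, List.foldl_nil]
    have hmid : pvGet ((pvRange 0 (n : Int)).foldl (fun h i => pvSet h (i+1) r (pvGet h (i+1) r + pvGet h i r)) h) (n : Int) r
        = pvSumTo (fun k => pvGet h k r) n := by
      rcases Nat.eq_zero_or_pos n with rfl | hn
      · rw [ih ((0:Nat) : Int) r, if_neg (by omega)]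
        simp [pvSumTo]
      · rw [ih (n : Int) r, if_pos ⟨rfl, by exact_mod_cast hn, le_refl _⟩]
        simp
    have htop : pvGet ((pvRange 0 (n : Int)).foldl (fun h i => pvSet h (i+1) r (pvGet h (i+1) r + pvGet h i r)) h) ((n : Int)+1) r
        = pvGet h ((n : Int) + 1) r := by
      rw [ih ((n : Int)+1) r, if_neg (by omega)]
    rw [pvGet_set]
    by_cases hxc : x = (n : Int) + 1 ∧ c = r
    · rw [if_pos hxc, hmid, htop]
      obtain ⟨hx1, rfl⟩ := hxc
      have hxt : x.toNat = n + 1 := by omega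
      rw [if_pos ⟨rfl, by omega, by omega⟩, hxt]
      simp only [pvSumTo]
      omega
    · rw [if_neg hxc, ih x c]
      by_cases hcond : c = r ∧ 1 ≤ x ∧ x ≤ (n : Int)
      · rw [if_pos hcond, if_pos ⟨hcond.1, hcond.2.1, by omega⟩]
      · rw [if_neg hcond, if_neg (by push_cast; omega)]

theorem pv_prefH_outer (rs : List Int) (hnd : rs.Nodup) (n : Nat) :
    ∀ (h : List ((Int × Int) × Int)) (x c : Int),
      pvGet ((rs.foldl (fun h j => (pvRange 0 (n : Int)).foldl (fun h i => pvSet h (i+1) j (pvGet h (i+1) j + pvGet h i j)) h) h)) x c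
      = if c ∈ rs ∧ 1 ≤ x ∧ x ≤ (n : Int) then pvSumTo (fun k => pvGet h k c) x.toNat else pvGet h x c := by
  revert hnd
  induction rs with
  | nil => intro _ h x c; simp
  | cons r rs ih =>
    intro hnd h x c
    obtain ⟨hr, hnd'⟩ := List.nodup_cons.mp hnd
    rw [List.foldl_cons, ih hnd' _ x c]
    have hinner := pv_prefH_inner n h r
    by_cases hxr : c = r
    · subst hxr
      rw [if_neg (fun hh => hr hh.1), hinner x c]
      by_cases hc : 1 ≤ x ∧ x ≤ (n : Int)
      · rw [if_pos ⟨rfl, hc.1, hc.2⟩, if_pos ⟨List.mem_cons_self, hc.1, hc.2⟩]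
      · rw [if_neg (by tauto), if_neg (by tauto)]
    · have hw1x : ∀ k, pvGet ((pvRange 0 (n : Int)).foldl (fun h i => pvSet h (i+1) r (pvGet h (i+1) r + pvGet h i r)) h) k c = pvGet h k c :=
        fun k => by rw [hinner k c, if_neg (by tauto)]
      by_cases hmem : c ∈ rs ∧ 1 ≤ x ∧ x ≤ (n : Int)
      · rw [if_pos hmem, if_pos ⟨List.mem_cons_of_mem _ hmem.1, hmem.2⟩]
        exact pvSumTo_congr _ _ (fun k => hw1x k) _
      · rw [if_neg hmem, hw1x x,
          if_neg (by intro hh; rcases List.mem_cons.mp hh.1 with rfl | hm; exact hxr rfl; exact hmem ⟨hm, hh.2⟩)]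

-- prefix sums of the difference rows count the covering crosses --------------

theorem pvSumTo_map_sum (l : List (Int × Int × Int)) (e : (Int × Int × Int) → Int → Int) (n : Nat) :
    pvSumTo (fun k => (l.map (fun t => e t k)).sum) n = (l.map (fun t => pvSumTo (e t) n)).sum := by
  induction l with
  | nil => simpa using pvSumTo_zero_fn n
  | cons t l ih =>
    simp only [List.map_cons, List.sum_cons]
    rw [pvSumTo_add, ih]

theorem pvSumTo_dw (a b s x c : Int) (hs : 1 ≤ s) (hb : 1 ≤ b - s) (hc : 1 ≤ c) :
    pvSumTo (fun k => pvDW (a, b, s) x k) c.toNat = if pvHCov (a, b, s) x c then 1 else 0 := by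
  have hc' : ((c.toNat : Int)) = c := Int.toNat_of_nonneg (by omega)
  by_cases hx : x = a
  · subst hx
    rw [pvSumTo_congr _ (fun k => (if k = b - s then (1:Int) else 0) - (if k = b + s + 1 then 1 else 0))
        (by intro k; simp [pvDW])]
    rw [pvSumTo_sub, pvSumTo_spike, pvSumTo_spike, hc']
    simp only [pvHCov, true_and]
    split_ifs <;> omega
  · rw [pvSumTo_congr _ (fun _ => (0:Int)) (by intro k; simp [pvDW, hx]), pvSumTo_zero_fn]
    simp [pvHCov, hx]

theorem pvSumTo_dh (a b s x c : Int) (hs : 1 ≤ s) (ha : 1 ≤ a - s) (hx : 1 ≤ x) :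
    pvSumTo (fun k => pvDH (a, b, s) k c) x.toNat = if pvVCov (a, b, s) x c then 1 else 0 := by
  have hx' : ((x.toNat : Int)) = x := Int.toNat_of_nonneg (by omega)
  by_cases hcb : c = b
  · subst hcb
    rw [pvSumTo_congr _ (fun k => (if k = a - s then (1:Int) else 0) - (if k = a + s + 1 then 1 else 0))
        (by intro k; simp [pvDH])]
    rw [pvSumTo_sub, pvSumTo_spike, pvSumTo_spike, hx']
    simp only [pvVCov, true_and]
    split_ifs <;> omega
  · rw [pvSumTo_congr _ (fun _ => (0:Int)) (by intro k; simp [pvDH, hcb]), pvSumTo_zero_fn]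
    simp [pvVCov, hcb]

theorem pv_sum_ind_eq_zero (l : List (Int × Int × Int)) (p : (Int × Int × Int) → Prop)
    [DecidablePred p] :
    (l.map (fun t => if p t then (1:Int) else 0)).sum = 0 ↔ ∀ t ∈ l, ¬ p t := by
  induction l with
  | nil => simp
  | cons t l ih =>
    have hnn : (0:Int) ≤ (l.map (fun t => if p t then (1:Int) else 0)).sum := by
      apply List.sum_nonneg
      intro x hx
      simp only [List.mem_map] at hx
      obtain ⟨t', _, rfl⟩ := hx
      split <;> omega
    simp only [List.map_cons, List.sum_cons, List.mem_cons]
    constructor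
    · intro h
      have h1 : (if p t then (1:Int) else 0) = 0 ∧ (l.map (fun t => if p t then (1:Int) else 0)).sum = 0 := by
        have : (0:Int) ≤ (if p t then (1:Int) else 0) := by split <;> omega
        omega
      have h2 := ih.mp h1.2
      intro t' ht'
      rcases ht' with rfl | ht'
      · intro hp; rw [if_pos hp] at h1; omega
      · exact h2 t' ht'
    · intro h
      have h1 : ¬ p t := h t (Or.inl rfl)
      rw [if_neg h1, ih.mpr (fun t' ht' => h t' (Or.inr ht'))]
      ring

-- the per-cell equivalence of the two final checks ---------------------------

theorem pv_cell_iff (H W : Int) (grid : List String) (hH : 1 ≤ H) (hW : 1 ≤ W)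
    (i j : Int) (hi1 : 1 ≤ i) (hiH : i ≤ H) (hj1 : 1 ≤ j) (hjW : j ≤ W) :
    (pvGet (pvPrefW H W (pvScanA H W (pvGrid grid) (pvRuns H W (pvGrid grid)).1 (pvRuns H W (pvGrid grid)).2.1 (pvRuns H W (pvGrid grid)).2.2.1 (pvRuns H W (pvGrid grid)).2.2.2).1) i j = 0 ∧
     pvGet (pvPrefH H W (pvScanA H W (pvGrid grid) (pvRuns H W (pvGrid grid)).1 (pvRuns H W (pvGrid grid)).2.1 (pvRuns H W (pvGrid grid)).2.2.1 (pvRuns H W (pvGrid grid)).2.2.2).2.1) i j = 0)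
    ↔ pvGetB (pvScanB H W (pvGrid grid) (pvRuns H W (pvGrid grid)).1 (pvRuns H W (pvGrid grid)).2.1 (pvRuns H W (pvGrid grid)).2.2.1 (pvRuns H W (pvGrid grid)).2.2.2).2 i j = false := by
  set g := pvGrid grid with hg
  set r := pvRuns H W g with hr
  set stA := pvScanA H W g r.1 r.2.1 r.2.2.1 r.2.2.2 with hstA
  set stB := pvScanB H W g r.1 r.2.1 r.2.2.1 r.2.2.2 with hstB
  obtain ⟨hBA, hw, hh, hcov, hbnd⟩ :=
    pv_scan H W g r.1 r.2.1 r.2.2.1 r.2.2.2 (hr ▸ pvRuns_L_bound H W g) (hr ▸ pvRuns_U_bound H W g)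
  have hnW : (((W+1).toNat : Nat) : Int) = W + 1 := Int.toNat_of_nonneg (by omega)
  have hnH : (((H+1).toNat : Nat) : Int) = H + 1 := Int.toNat_of_nonneg (by omega)
  -- the horizontal prefix sum at (i, j)
  have hwf : pvGet (pvPrefW H W stA.1) i j = pvSumTo (fun k => pvGet stA.1 i k) j.toNat := by
    unfold pvPrefW
    rw [show pvRange 0 (W+1) = pvRange 0 (((W+1).toNat : Nat) : Int) from by rw [hnW]]
    rw [pv_prefW_outer (pvRange 1 (H+1)) (by unfold pvRange; exact PySem.List.nodup_pyRange_one _ _) ((W+1).toNat) stA.1 i j]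
    rw [if_pos ⟨by unfold pvRange; exact PySem.List.mem_pyRange_one.mpr ⟨hi1, by omega⟩, hj1, by rw [hnW]; omega⟩]
  have hhf : pvGet (pvPrefH H W stA.2.1) i j = pvSumTo (fun k => pvGet stA.2.1 k j) i.toNat := by
    unfold pvPrefH
    rw [show pvRange 0 (H+1) = pvRange 0 (((H+1).toNat : Nat) : Int) from by rw [hnH]]
    rw [pv_prefH_outer (pvRange 1 (W+1)) (by unfold pvRange; exact PySem.List.nodup_pyRange_one _ _) ((H+1).toNat) stA.2.1 i j]
    rw [if_pos ⟨by unfold pvRange; exact PySem.List.mem_pyRange_one.mpr ⟨hj1, by omega⟩, hi1, by rw [hnH]; omega⟩]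
  have hwsum : pvSumTo (fun k => pvGet stA.1 i k) j.toNat
      = (stA.2.2.map (fun t => if pvHCov t i j then (1:Int) else 0)).sum := by
    rw [pvSumTo_congr _ (fun k => pvDiffW stA.2.2 i k) (fun k => hw i k)]
    simp only [pvDiffW]
    rw [pvSumTo_map_sum stA.2.2 (fun t k => pvDW t i k) j.toNat]
    refine congrArg List.sum (List.map_congr_left ?_)
    intro t ht
    obtain ⟨a, b, sz⟩ := t
    exact pvSumTo_dw a b sz i j (hbnd _ ht).1 (hbnd _ ht).2.1 hj1
  have hhsum : pvSumTo (fun k => pvGet stA.2.1 k j) i.toNat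
      = (stA.2.2.map (fun t => if pvVCov t i j then (1:Int) else 0)).sum := by
    rw [pvSumTo_congr _ (fun k => pvDiffH stA.2.2 k j) (fun k => hh k j)]
    simp only [pvDiffH]
    rw [pvSumTo_map_sum stA.2.2 (fun t k => pvDH t k j) i.toNat]
    refine congrArg List.sum (List.map_congr_left ?_)
    intro t ht
    obtain ⟨a, b, sz⟩ := t
    exact pvSumTo_dh a b sz i j (hbnd _ ht).1 (hbnd _ ht).2.2 hi1
  rw [hwf, hhf, hwsum, hhsum, pv_sum_ind_eq_zero, pv_sum_ind_eq_zero]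
  constructor
  · rintro ⟨h1, h2⟩
    rw [Bool.eq_false_iff]
    intro htrue
    obtain ⟨t, ht, hc⟩ := (hcov i j).mp htrue
    rcases hc with hc | hc
    · exact h1 t ht hc
    · exact h2 t ht hc
  · intro hfalse
    rw [Bool.eq_false_iff] at hfalse
    constructor
    · intro t ht hc; exact hfalse ((hcov i j).mpr ⟨t, ht, Or.inl hc⟩)
    · intro t ht hc; exact hfalse ((hcov i j).mpr ⟨t, ht, Or.inr hc⟩)

theorem pv_all_congr (l : List Int) (f g : Int → Bool) (h : ∀ x ∈ l, f x = g x) :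
    l.all f = l.all g := by
  induction l with
  | nil => rfl
  | cons a l ih =>
    simp only [List.all_cons]
    rw [h a (List.mem_cons_self), ih (fun x hx => h x (List.mem_cons_of_mem _ hx))]

-- ===== VERDICT (by name: the statement is the Claim_ definition above) =====
theorem run_core_spec : Claim_equal_run_core := by
  intro H W grid _ _
  unfold Spec_run_core
  show run_core H W grid = run_core_alt H W grid
  by_cases hH : 1 ≤ H
  case neg =>
    have hnil : pvRange 1 (H+1) = [] := by
      unfold pvRange; exact PySem.List.pyRange_one_eq_nil (by omega)
    simp only [run_core, run_core_alt, pvScanA, pvScanB, hnil, List.foldl_nil, List.all_nil]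
  by_cases hW : 1 ≤ W
  case neg =>
    have hnil : pvRange 1 (W+1) = [] := by
      unfold pvRange; exact PySem.List.pyRange_one_eq_nil (by omega)
    simp only [run_core, run_core_alt, pvScanA, pvScanB, hnil, List.foldl_nil, List.all_nil,
      pv_foldl_id, List.all_eq_true, implies_true, if_true]
  -- main case: 1 ≤ H and 1 ≤ W
  simp only [run_core, run_core_alt]
  have hBA := (pv_scan H W (pvGrid grid) (pvRuns H W (pvGrid grid)).1 (pvRuns H W (pvGrid grid)).2.1
    (pvRuns H W (pvGrid grid)).2.2.1 (pvRuns H W (pvGrid grid)).2.2.2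
    (pvRuns_L_bound H W (pvGrid grid)) (pvRuns_U_bound H W (pvGrid grid))).1
  rw [hBA]
  have hok : ∀ i ∈ pvRange 1 (H+1), ((pvRange 1 (W+1)).all (fun j =>
      !(decide (pvGrid grid i j = '*') &&
        decide (pvGet (pvPrefW H W (pvScanA H W (pvGrid grid) (pvRuns H W (pvGrid grid)).1 (pvRuns H W (pvGrid grid)).2.1 (pvRuns H W (pvGrid grid)).2.2.1 (pvRuns H W (pvGrid grid)).2.2.2).1) i j = 0) &&
        decide (pvGet (pvPrefH H W (pvScanA H W (pvGrid grid) (pvRuns H W (pvGrid grid)).1 (pvRuns H W (pvGrid grid)).2.1 (pvRuns H W (pvGrid grid)).2.2.1 (pvRuns H W (pvGrid grid)).2.2.2).2.1) i j = 0)))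
      = (pvRange 1 (W+1)).all (fun j =>
      !(decide (pvGrid grid i j = '*') &&
        !(pvGetB (pvScanB H W (pvGrid grid) (pvRuns H W (pvGrid grid)).1 (pvRuns H W (pvGrid grid)).2.1 (pvRuns H W (pvGrid grid)).2.2.1 (pvRuns H W (pvGrid grid)).2.2.2).2 i j)))) := by
    intro i hi
    refine pv_all_congr _ _ _ ?_
    intro j hj
    have hib := PySem.List.mem_pyRange_one.mp (show i ∈ PySem.List.pyRange 1 (H+1) 1 from hi)
    have hjb := PySem.List.mem_pyRange_one.mp (show j ∈ PySem.List.pyRange 1 (W+1) 1 from hj)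
    have hcell := pv_cell_iff H W grid hH hW i j hib.1 (by omega) hjb.1 (by omega)
    refine congrArg (fun b => !b) ?_
    rw [Bool.and_assoc]
    refine congrArg (fun b => decide (pvGrid grid i j = '*') && b) ?_
    by_cases h1 : pvGet (pvPrefW H W (pvScanA H W (pvGrid grid) (pvRuns H W (pvGrid grid)).1 (pvRuns H W (pvGrid grid)).2.1 (pvRuns H W (pvGrid grid)).2.2.1 (pvRuns H W (pvGrid grid)).2.2.2).1) i j = 0
    · by_cases h2 : pvGet (pvPrefH H W (pvScanA H W (pvGrid grid) (pvRuns H W (pvGrid grid)).1 (pvRuns H W (pvGrid grid)).2.1 (pvRuns H W (pvGrid grid)).2.2.1 (pvRuns H W (pvGrid grid)).2.2.2).2.1) i j = 0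
      · have hc := hcell.mp ⟨h1, h2⟩
        simp [h1, h2, hc]
      · have hc : pvGetB (pvScanB H W (pvGrid grid) (pvRuns H W (pvGrid grid)).1 (pvRuns H W (pvGrid grid)).2.1 (pvRuns H W (pvGrid grid)).2.2.1 (pvRuns H W (pvGrid grid)).2.2.2).2 i j = true := by
          cases hc : pvGetB (pvScanB H W (pvGrid grid) (pvRuns H W (pvGrid grid)).1 (pvRuns H W (pvGrid grid)).2.1 (pvRuns H W (pvGrid grid)).2.2.1 (pvRuns H W (pvGrid grid)).2.2.2).2 i j
          · exact absurd (hcell.mpr hc).2 h2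
          · rfl
        simp [h1, h2, hc]
    · have hc : pvGetB (pvScanB H W (pvGrid grid) (pvRuns H W (pvGrid grid)).1 (pvRuns H W (pvGrid grid)).2.1 (pvRuns H W (pvGrid grid)).2.2.1 (pvRuns H W (pvGrid grid)).2.2.2).2 i j = true := by
        cases hc : pvGetB (pvScanB H W (pvGrid grid) (pvRuns H W (pvGrid grid)).1 (pvRuns H W (pvGrid grid)).2.1 (pvRuns H W (pvGrid grid)).2.2.1 (pvRuns H W (pvGrid grid)).2.2.2).2 i j
        · exact absurd (hcell.mpr hc).1 h1
        · rfl
      simp [h1, hc]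
  rw [pv_all_congr _ _ _ hok]
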